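-- pv_equiv track=rewrite | github.com/fernandacaron/pynnotate | pynnotate/main/main.py | classify_positional_tRNA
-- ===== SOURCE A (Python) =====
-- def classify_positional_tRNA(start, ref_pos_all, name_trna, tolerancia_bp=10):
--
-- 	anchors = sorted(
-- 		[(gene, pos) for gene, pos_list in ref_pos_all.items()
-- 		 if not gene.upper().startswith("TRNA") for pos in pos_list],
-- 		key=lambda x: x[1]
-- 	)
--
-- 	for gene, pos in anchors:
-- 		if start < (pos + tolerancia_bp):
-- 			return f"{name_trna}_before_start_{gene}"
--
-- 	return f"{name_trna}_unclassified"
-- ===== SOURCE B (Python) =====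
-- def classify_positional_tRNA(start, ref_pos_all, name_trna, tolerancia_bp=10):
-- 	best = None  # (gene, pos) with minimal qualifying pos, first in dict order on ties
-- 	for gene, pos_list in ref_pos_all.items():
-- 		if gene.upper().startswith("TRNA"):
-- 			continue
-- 		for pos in pos_list:
-- 			if start < pos + tolerancia_bp and (best is None or pos < best[1]):
-- 				best = (gene, pos)
-- 	if best is None:
-- 		return f"{name_trna}_unclassified"
-- 	return f"{name_trna}_before_start_{best[0]}"
-- ===== Notes on version B (the rewrite author's own statement) =====
-- stated objective: faster
-- what changed: Replaces build-flatten-sort-then-scan with a single linear pass over the dict items that tracks the minimum qualifying position (strict-< update preserves A's stable-sort first-occurrence tie-break), so no anchor list is built and no sort happens.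
import Mathlib
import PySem

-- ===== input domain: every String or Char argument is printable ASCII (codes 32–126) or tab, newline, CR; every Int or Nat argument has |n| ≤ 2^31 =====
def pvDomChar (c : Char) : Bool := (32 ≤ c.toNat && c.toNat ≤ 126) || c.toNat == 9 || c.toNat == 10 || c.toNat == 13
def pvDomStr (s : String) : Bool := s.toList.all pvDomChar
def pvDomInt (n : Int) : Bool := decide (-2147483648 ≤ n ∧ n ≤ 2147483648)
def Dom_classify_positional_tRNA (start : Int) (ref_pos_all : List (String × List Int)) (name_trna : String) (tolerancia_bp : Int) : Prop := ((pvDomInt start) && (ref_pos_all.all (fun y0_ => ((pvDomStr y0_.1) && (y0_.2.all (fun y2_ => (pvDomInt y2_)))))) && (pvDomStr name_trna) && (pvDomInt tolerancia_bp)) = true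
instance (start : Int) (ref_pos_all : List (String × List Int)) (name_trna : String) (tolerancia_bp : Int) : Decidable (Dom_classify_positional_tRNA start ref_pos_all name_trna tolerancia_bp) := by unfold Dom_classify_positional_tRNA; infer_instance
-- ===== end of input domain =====

-- B replaces A's build-flatten-sort-then-scan by a single linear pass tracking the minimum
-- qualifying position (strict-< update keeps A's stable-sort first-occurrence tie-break): O(n) vs O(n log n).

-- ===== PORT A =====
-- the list comprehension: flatten dict items, dropping genes whose upper() starts with "TRNA"
def pvFlatA (items : List (String × List Int)) : List (String × Int) :=
  items.flatMap (fun gp =>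
    if PySem.Str.startswith (PySem.Str.upper gp.1) "TRNA" then []
    else gp.2.map (fun p => (gp.1, p)))

-- the 'for gene, pos in anchors' loop with its early return
def pvLoopA (start : Int) (name_trna : String) (tolerancia_bp : Int) : List (String × Int) → String
  | [] => name_trna ++ "_unclassified"
  | (gene, pos) :: rest =>
    if start < pos + tolerancia_bp then name_trna ++ "_before_start_" ++ gene
    else pvLoopA start name_trna tolerancia_bp rest

def classify_positional_tRNA (start : Int) (ref_pos_all : List (String × List Int)) (name_trna : String) (tolerancia_bp : Int) : String :=
  pvLoopA start name_trna tolerancia_bp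
    (PySem.List.sorted (pvFlatA (PySem.Dict.ofList ref_pos_all).items) (fun x => x.2))

-- ===== PORT B =====
-- single pass: best = first (gene, pos) in dict order with minimal pos among qualifying positions
def pvBestB (start : Int) (tolerancia_bp : Int) (items : List (String × List Int)) : Option (String × Int) :=
  items.foldl (fun best gp =>
    if PySem.Str.startswith (PySem.Str.upper gp.1) "TRNA" then best
    else gp.2.foldl (fun b pos =>
      if start < pos + tolerancia_bp ∧ (∀ m ∈ b, pos < m.2) then some (gp.1, pos) else b) best)
    none

def classify_positional_tRNA_alt (start : Int) (ref_pos_all : List (String × List Int)) (name_trna : String) (tolerancia_bp : Int) : String :=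
  match pvBestB start tolerancia_bp (PySem.Dict.ofList ref_pos_all).items with
  | none => name_trna ++ "_unclassified"
  | some (gene, _) => name_trna ++ "_before_start_" ++ gene

-- ===== PRECONDITION & SPEC =====
def Spec_classify_positional_tRNA (start : Int) (ref_pos_all : List (String × List Int)) (name_trna : String) (tolerancia_bp : Int) (out : String) : Prop := out = classify_positional_tRNA_alt start ref_pos_all name_trna tolerancia_bp
instance (start : Int) (ref_pos_all : List (String × List Int)) (name_trna : String) (tolerancia_bp : Int) (out : String) : Decidable (Spec_classify_positional_tRNA start ref_pos_all name_trna tolerancia_bp out) := by unfold Spec_classify_positional_tRNA; infer_instance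

-- ===== CLAIM (what is proved, stated in full; the proofs are below) =====
def Claim_equal_classify_positional_tRNA : Prop := ∀ (start : Int) (ref_pos_all : List (String × List Int)) (name_trna : String) (tolerancia_bp : Int), Dom_classify_positional_tRNA start ref_pos_all name_trna tolerancia_bp → Spec_classify_positional_tRNA start ref_pos_all name_trna tolerancia_bp (classify_positional_tRNA start ref_pos_all name_trna tolerancia_bp)

-- ===== LEMMAS AND PROOFS =====

-- the one-element update of B's pass, as a standalone function
def pvStep (start tolerancia_bp : Int) (b : Option (String × Int)) (x : String × Int) : Option (String × Int) :=
  if start < x.2 + tolerancia_bp ∧ (∀ m ∈ b, x.2 < m.2) then some x else b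

-- B's nested pass is the pvStep-fold over A's flattened anchor list (pre-sort)
theorem pvBestB_eq_foldl (start tol : Int) (items : List (String × List Int)) :
    pvBestB start tol items = (pvFlatA items).foldl (pvStep start tol) none := by
  unfold pvBestB pvFlatA
  rw [List.foldl_flatMap]
  apply PySem.List.foldl_congr_mem
  intro acc gp _
  split_ifs with h
  · rfl
  · rw [List.foldl_map]; rfl

-- inserting x into a key-sorted list commutes with find?-first via pvStep
theorem pvFind_insertBy (start tol : Int) (x : String × Int) (M : List (String × Int))
    (hM : M.Pairwise (fun a b => a.2 ≤ b.2)) :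
    (PySem.List.insertBy (fun a b => decide (a.2 < b.2)) x M).find?
        (fun y => decide (start < y.2 + tol))
      = pvStep start tol (M.find? (fun y => decide (start < y.2 + tol))) x := by
  induction M with
  | nil => simp [PySem.List.insertBy, pvStep, List.find?]
  | cons y t ih =>
    rcases List.pairwise_cons.mp hM with ⟨hy, ht⟩
    by_cases hxy : x.2 < y.2
    · -- x goes in front
      simp only [PySem.List.insertBy, decide_eq_true_eq, hxy, if_pos]
      by_cases hqx : start < x.2 + tol
      · -- x qualifies and its key is strictly below every key in y :: t
        have hlt : ∀ m ∈ (y :: t).find? (fun y => decide (start < y.2 + tol)), x.2 < m.2 := by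
          intro m hm
          rcases List.mem_cons.mp (List.mem_of_find?_eq_some hm) with rfl | hm2
          · exact hxy
          · exact lt_of_lt_of_le hxy (hy m hm2)
        have hfx : List.find? (fun y => decide (start < y.2 + tol)) (x :: y :: t) = some x := by
          simp [List.find?, hqx]
        rw [hfx, pvStep, if_pos ⟨hqx, hlt⟩]
      · -- x fails: step keeps the accumulator, find? skips x
        simp [pvStep, hqx, List.find?]
    · -- x goes further right
      simp only [PySem.List.insertBy, decide_eq_true_eq, hxy, if_neg, not_false_iff]
      by_cases hqy : start < y.2 + tol
      · -- y is the first hit on both sides; step cannot replace it since ¬(x.2 < y.2)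
        simp [List.find?, hqy, pvStep, hxy]
      · simp only [List.find?, hqy]
        simpa using ih ht

-- find?-first on the stably sorted list equals B's left fold over the original list
theorem pvFind_sorted (start tol : Int) (L : List (String × Int)) :
    (PySem.List.sorted L (fun x => x.2)).find? (fun y => decide (start < y.2 + tol))
      = L.foldl (pvStep start tol) none := by
  rw [PySem.List.sorted_eq_foldl_insertBy]
  induction L using List.reverseRecOn with
  | nil => rfl
  | append_singleton L x ih =>
    rw [List.foldl_append, List.foldl_append, List.foldl_cons, List.foldl_nil,
        List.foldl_cons, List.foldl_nil]
    have hp : (L.foldl (fun acc x => PySem.List.insertBy (fun a b => decide (a.2 < b.2)) x acc)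
        []).Pairwise (fun a b => a.2 ≤ b.2) := by
      rw [← PySem.List.sorted_eq_foldl_insertBy]
      exact PySem.List.sorted_pairwise L (fun x => x.2)
    rw [pvFind_insertBy start tol x _ hp, ih]

-- A's early-return loop renders the first find? hit
theorem pvLoopA_eq_find (start tol : Int) (name : String) (M : List (String × Int)) :
    pvLoopA start name tol M
      = match M.find? (fun y => decide (start < y.2 + tol)) with
        | none => name ++ "_unclassified"
        | some m => name ++ "_before_start_" ++ m.1 := by
  induction M with
  | nil => rfl
  | cons y t ih =>
    by_cases hq : start < y.2 + tol
    · simp [pvLoopA, List.find?, hq]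
    · simp only [pvLoopA, List.find?, hq, if_neg, not_false_iff]
      simpa using ih

-- ===== VERDICT (by name: the statement is the Claim_ definition above) =====
theorem classify_positional_tRNA_spec : Claim_equal_classify_positional_tRNA := by
  intro start ref_pos_all name_trna tolerancia_bp _
  unfold Spec_classify_positional_tRNA classify_positional_tRNA classify_positional_tRNA_alt
  rw [pvLoopA_eq_find, pvFind_sorted, pvBestB_eq_foldl]
  rcases h : (pvFlatA (PySem.Dict.ofList ref_pos_all).items).foldl
      (pvStep start tolerancia_bp) none with _ | ⟨g, p⟩ <;> simp
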